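-- pv_equiv track=rewrite | github.com/ngvgi/algos | Data structure implementation/trees/Untitled-3.py | solution
-- ===== SOURCE A (Python) =====
-- def solution(A, B):
--
--     grid = [A,B]
--
--     if not grid or not grid[0]:
--         return 0
--
--     rows, cols = 2, len(grid[0])
--
--     # Initialize a 2xN memoization table to store optimal choices
--     memo = [[0] * cols for _ in range(rows)]
--
--     # Initialize the first cell in the memo table
--     memo[0][0] = grid[0][0]
--
--     # Fill the first row of the memo table
--     for col in range(1, cols):
--         memo[0][col] = max(memo[0][col - 1], grid[0][col])
--
--     # Fill the memo table based on the optimal choices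
--     for row in range(1, rows):
--         for col in range(cols):
--             if col == 0:
--                 memo[row][col] = max(memo[row - 1][col], grid[row][col])
--             else:
--                 memo[row][col] = max(min(memo[row - 1][col], memo[row][col - 1]), grid[row][col])
--
--     # The bottom-right cell of the memo table contains the maximum value for the traversal
--     return memo[1][cols - 1]
-- ===== SOURCE B (Python) =====
-- def solution(A, B):
--     # Closed form instead of the DP recurrence: the traversal value equals
--     # max(A[0], B[-1], max over j < n-1 of min(max(A[0..j+1]), B[j])),
--     # computed from a prefix-max array of A and one independent max over candidates.
--     if not A:
--         return 0
--     n = len(A)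
--     P = []
--     m = A[0]
--     for x in A:
--         m = m if m > x else x
--         P.append(m)
--     candidates = [A[0], B[n - 1]] + [min(P[j + 1], B[j]) for j in range(n - 1)]
--     return max(candidates)
-- ===== Notes on version B (the rewrite author's own statement) =====
-- stated objective: alternative
-- what changed: Replaces A's 2xN min/max DP recurrence with a proved closed form: the answer is max(A[0], B[-1], max over j of min(prefix-max of A up to j+1, B[j])), computed from a prefix-max array plus one independent max over candidates, with no value carried between columns.
import Mathlib
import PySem

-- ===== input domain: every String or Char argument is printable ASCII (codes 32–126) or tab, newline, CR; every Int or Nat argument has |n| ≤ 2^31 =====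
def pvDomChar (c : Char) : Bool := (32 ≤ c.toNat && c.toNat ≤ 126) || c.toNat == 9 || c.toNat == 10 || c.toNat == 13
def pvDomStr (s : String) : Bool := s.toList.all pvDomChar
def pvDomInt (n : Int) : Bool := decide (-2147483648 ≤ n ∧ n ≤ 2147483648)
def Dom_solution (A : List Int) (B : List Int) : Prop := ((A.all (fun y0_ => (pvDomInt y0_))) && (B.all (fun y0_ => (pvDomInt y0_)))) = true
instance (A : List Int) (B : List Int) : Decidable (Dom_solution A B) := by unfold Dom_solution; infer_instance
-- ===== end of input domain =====

-- B replaces A's 2xN min/max DP recurrence by a closed form (prefix-max array + one max over independent per-column candidates); return-value equivalence on Pre_.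


-- ===== PORT A =====
-- Literal port of A: build memo row 0 (prefix maxima of A) into a [0]*cols list, then memo
-- row 1, then read memo[1][cols-1].  pyGetD/pySetD with default 0 are exact here because under
-- Pre_solution every index Python touches is in range.
def solution (A : List Int) (B : List Int) : Int :=
  if A = [] then 0
  else
    let cols : Nat := A.length
    let row0 : List Int :=
      (PySem.List.pyRange 1 (cols : Int) 1).foldl
        (fun m col =>
          PySem.List.pySetD m col (max (PySem.List.pyGetD m (col - 1) 0) (PySem.List.pyGetD A col 0)))
        (PySem.List.pySetD (List.replicate cols 0) 0 (PySem.List.pyGetD A 0 0))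
    let row1 : List Int :=
      (PySem.List.pyRange 0 (cols : Int) 1).foldl
        (fun m col =>
          if col = 0 then
            PySem.List.pySetD m col (max (PySem.List.pyGetD row0 col 0) (PySem.List.pyGetD B col 0))
          else
            PySem.List.pySetD m col
              (max (min (PySem.List.pyGetD row0 col 0) (PySem.List.pyGetD m (col - 1) 0))
                   (PySem.List.pyGetD B col 0)))
        (List.replicate cols 0)
    PySem.List.pyGetD row1 ((cols : Int) - 1) 0

-- ===== PORT B =====
-- Port of Source B: prefix-max list P of A built by one append loop, then max over the
-- candidate list [A[0], B[n-1]] ++ [min(P[j+1], B[j]) for j in range(n-1)].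
-- Python's builtin max(candidates) is ported as foldl max over the nonempty list.
def solution_alt (A : List Int) (B : List Int) : Int :=
  if A = [] then 0
  else
    let n : Nat := A.length
    let s :=
      A.foldl
        (fun (p : Int × List Int) x =>
          let m := if p.1 > x then p.1 else x
          (m, p.2 ++ [m]))
        (PySem.List.pyGetD A 0 0, [])
    let P := s.2
    let rest : List Int :=
      PySem.List.pyGetD B ((n : Int) - 1) 0 ::
        (PySem.List.pyRange 0 ((n : Int) - 1) 1).map
          (fun j => min (PySem.List.pyGetD P (j + 1) 0) (PySem.List.pyGetD B j 0))
    rest.foldl max (PySem.List.pyGetD A 0 0)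

-- ===== PRECONDITION & SPEC =====
-- Pre_ excludes nonempty A with B shorter than A: there Python A (and B) raise IndexError reading B[col].
def Pre_solution (A : List Int) (B : List Int) : Prop := A = [] ∨ A.length ≤ B.length
instance (A : List Int) (B : List Int) : Decidable (Pre_solution A B) := by unfold Pre_solution; infer_instance
def pvWitness_solution : List Int × List Int := ([3, 1, 4], [2, 7, 1])

def Spec_solution (A : List Int) (B : List Int) (out : Int) : Prop := out = solution_alt A B
instance (A : List Int) (B : List Int) (out : Int) : Decidable (Spec_solution A B out) := by unfold Spec_solution; infer_instance

-- ===== CLAIM (what is proved, stated in full; the proofs are below) =====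
def Claim_equal_solution : Prop := ∀ (A : List Int) (B : List Int), Dom_solution A B → Pre_solution A B → Spec_solution A B (solution A B)

-- ===== LEMMAS AND PROOFS =====

-- cast/index helpers for the fold steps
theorem pv_cast_succ (k : Nat) : (k : Int) + 1 = ((k + 1 : Nat) : Int) := by push_cast; ring

theorem pv_pySetD_zero (xs : List Int) (v : Int) : PySem.List.pySetD xs 0 v = xs.set 0 v := by
  simp [pysem]

theorem pv_replicate_set_zero (n : Nat) (v : Int) :
    (List.replicate n (0:Int)).set 0 v = (List.range n).map (fun i => if i = 0 then v else 0) := by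
  apply List.ext_getElem
  · simp
  · intro i h1 h2
    simp only [List.getElem_set, List.getElem_map, List.getElem_range, List.getElem_replicate]
    by_cases h : i = 0
    · subst h; simp
    · rw [if_neg (fun hh => h hh.symm), if_neg h]

-- prefix max of A (the mathematical content of memo row 0 / list P)
def pvF (A : List Int) : Nat → Int
  | 0 => A.getD 0 0
  | k + 1 => max (pvF A k) (A.getD (k + 1) 0)

-- the recurrence A computes (memo row 1)
def pvG (A B : List Int) : Nat → Int
  | 0 => max (A.getD 0 0) (B.getD 0 0)
  | k + 1 => max (min (pvG A B k) (pvF A (k + 1))) (B.getD (k + 1) 0)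

-- a set into (List.range n).map f, as another such map
theorem pv_set_map_range (n k : Nat) (f : Nat → Int) (v : Int) (_hk : k < n) :
    ((List.range n).map f).set k v = (List.range n).map (fun i => if i = k then v else f i) := by
  apply List.ext_getElem
  · simp
  · intro i h1 h2
    simp only [List.getElem_set, List.getElem_map, List.getElem_range]
    by_cases h : k = i
    · subst h; simp
    · rw [if_neg h, if_neg (fun hh => h hh.symm)]

theorem pv_getD_map_range (n k : Nat) (f : Nat → Int) (hk : k < n) :
    ((List.range n).map f).getD k 0 = f k := by
  rw [List.getD_eq_getElem _ _ (by simpa using hk)]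
  simp

-- memo row 0 after processing columns 1..m equals the prefix maxima up to m (rest still 0)
def pvRow0 (A : List Int) (m : Nat) : List Int :=
  (List.range A.length).map (fun i => if i ≤ m then pvF A i else 0)

theorem pv_row0_fold (A : List Int) (m : Nat) (hm : m < A.length) :
    (PySem.List.pyRange 1 ((m : Int) + 1) 1).foldl
        (fun m' col =>
          PySem.List.pySetD m' col (max (PySem.List.pyGetD m' (col - 1) 0) (PySem.List.pyGetD A col 0)))
        (pvRow0 A 0)
      = pvRow0 A m := by
  induction m with
  | zero => simp [PySem.List.pyRange_one_eq_nil]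
  | succ k ih =>
      have h : ((k : Int) + 1 + 1) = ((k : Int) + 1) + 1 := by ring
      rw [show ((k + 1 : Nat) : Int) = (k : Int) + 1 by push_cast; ring,
          h, PySem.List.pyRange_one_succ_right (by omega), List.foldl_append,
          ih (by omega)]
      simp only [List.foldl]
      rw [show (k : Int) + 1 - 1 = ((k : Nat) : Int) by ring, pv_cast_succ k]
      simp only [PySem.List.pySetD_natCast, PySem.List.pyGetD_natCast]
      unfold pvRow0
      rw [pv_getD_map_range _ _ _ (by omega), if_pos (le_refl k),
          pv_set_map_range _ _ _ _ (by simpa using hm)]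
      apply List.map_congr_left
      intro i _
      by_cases h1 : i = k + 1
      · subst h1; simp [pvF]
      · by_cases h2 : i ≤ k <;> simp [h1, h2] <;> omega

-- memo row 1 after processing columns 0..m equals pvG up to m (rest still 0)
def pvRow1 (A B : List Int) (m : Nat) : List Int :=
  (List.range A.length).map (fun i => if i ≤ m then pvG A B i else 0)

theorem pv_row1_fold (A B : List Int) (hA : A ≠ []) (m : Nat) (hm : m < A.length) :
    (PySem.List.pyRange 0 ((m : Int) + 1) 1).foldl
        (fun m' col =>
          if col = 0 then
            PySem.List.pySetD m' col (max (PySem.List.pyGetD (pvRow0 A (A.length - 1)) col 0) (PySem.List.pyGetD B col 0))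
          else
            PySem.List.pySetD m' col
              (max (min (PySem.List.pyGetD (pvRow0 A (A.length - 1)) col 0) (PySem.List.pyGetD m' (col - 1) 0))
                   (PySem.List.pyGetD B col 0)))
        (List.replicate A.length 0)
      = pvRow1 A B m := by
  have hn : 1 ≤ A.length := List.length_pos_of_ne_nil hA
  have hget0 : ∀ c : Nat, c < A.length →
      PySem.List.pyGetD (pvRow0 A (A.length - 1)) (c : Int) 0 = pvF A c := by
    intro c hc
    unfold pvRow0
    rw [PySem.List.pyGetD_natCast, pv_getD_map_range _ _ _ hc, if_pos (by omega)]
  induction m with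
  | zero =>
      have e1 : PySem.List.pyGetD (pvRow0 A (A.length - 1)) (0:Int) 0 = pvF A 0 := by
        rw [PySem.List.pyGetD_zero]
        unfold pvRow0
        rw [pv_getD_map_range _ _ _ (by omega), if_pos (by omega)]
      rw [show ((0 : Nat) : Int) + 1 = 0 + 1 by norm_num, PySem.List.pyRange_one_singleton]
      simp only [List.foldl]
      rw [if_pos trivial, e1, PySem.List.pyGetD_zero, pv_pySetD_zero, pv_replicate_set_zero]
      unfold pvRow1
      apply List.map_congr_left
      intro i _
      by_cases h : i = 0
      · subst h; simp [pvF, pvG]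
      · simp [h]
  | succ k ih =>
      have h : ((k : Int) + 1 + 1) = ((k : Int) + 1) + 1 := by ring
      rw [show ((k + 1 : Nat) : Int) = (k : Int) + 1 by push_cast; ring,
          h, PySem.List.pyRange_one_succ_right (by omega), List.foldl_append,
          ih (by omega)]
      simp only [List.foldl]
      rw [if_neg (by omega)]
      rw [show (k : Int) + 1 - 1 = ((k : Nat) : Int) by ring, pv_cast_succ k]
      rw [hget0 (k + 1) hm]
      simp only [PySem.List.pySetD_natCast, PySem.List.pyGetD_natCast]
      unfold pvRow1
      rw [pv_getD_map_range _ _ _ (by omega), if_pos (le_refl k),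
          pv_set_map_range _ _ _ _ hm]
      apply List.map_congr_left
      intro i _
      by_cases h1 : i = k + 1
      · subst h1
        simp only [pvG]
        rw [min_comm]
        simp
      · by_cases h2 : i ≤ k <;> simp [h1, h2] <;> omega

theorem pv_a_eq (A B : List Int) (hA : A ≠ []) :
    solution A B = pvG A B (A.length - 1) := by
  unfold solution
  rw [if_neg hA]
  have hn : 1 ≤ A.length := List.length_pos_of_ne_nil hA
  have hlen : (A.length : Int) = ((A.length - 1 : Nat) : Int) + 1 := by omega
  have hinit : PySem.List.pySetD (List.replicate A.length (0:Int)) 0 (PySem.List.pyGetD A 0 0) = pvRow0 A 0 := by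
    rw [PySem.List.pyGetD_zero, pv_pySetD_zero, pv_replicate_set_zero]
    unfold pvRow0
    apply List.map_congr_left
    intro i _
    by_cases h : i = 0
    · subst h; simp [pvF]
    · simp [h]
  simp only
  rw [hinit, hlen, pv_row0_fold A (A.length - 1) (by omega),
      pv_row1_fold A B hA (A.length - 1) (by omega)]
  rw [show ((A.length - 1 : Nat) : Int) + 1 - 1 = ((A.length - 1 : Nat) : Int) by ring,
      PySem.List.pyGetD_natCast]
  unfold pvRow1
  rw [pv_getD_map_range _ _ _ (by omega), if_pos (le_refl _)]

-- ---------- B side: the closed form ----------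

-- running max of a list (the scan value carried by Source B's loop)
def pvScan (xs : List Int) (m : Int) : List Int :=
  match xs with
  | [] => []
  | x :: xs' => (max m x) :: pvScan xs' (max m x)

theorem pv_fold_scan (xs : List Int) (m : Int) (acc : List Int) :
    xs.foldl
        (fun (p : Int × List Int) x =>
          let m' := if p.1 > x then p.1 else x
          (m', p.2 ++ [m']))
        (m, acc)
      = (xs.foldl max m, acc ++ pvScan xs m) := by
  induction xs generalizing m acc with
  | nil => simp [pvScan]
  | cons x xs' ih =>
      simp only [List.foldl, pvScan]
      have hm : (if m > x then m else x) = max m x := by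
        rcases le_or_gt m x with h | h
        · rw [if_neg (by omega), max_eq_right h]
        · rw [if_pos h, max_eq_left (le_of_lt h)]
      rw [hm, ih]
      simp

-- the scan entries are the prefix maxima
theorem pv_scan_getD (xs : List Int) (m : Int) (i : Nat) (hi : i < xs.length) :
    (pvScan xs m).getD i 0 = max m (pvF xs i) := by
  induction i generalizing xs m with
  | zero =>
      cases xs with
      | nil => simp at hi
      | cons x xs' => simp [pvScan, pvF]
  | succ k ih =>
      cases xs with
      | nil => simp at hi
      | cons x xs' =>
          have hk : k < xs'.length := by simpa using hi
          simp only [pvScan, List.getD_cons_succ]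
          rw [ih xs' (max m x) hk]
          -- pvF (x :: xs') (k+1) = max x (pvF xs' k): prove by auxiliary induction
          have hpv : ∀ j : Nat, j < xs'.length → pvF (x :: xs') (j + 1) = max x (pvF xs' j) := by
            intro j hj
            induction j with
            | zero => simp [pvF]
            | succ t iht =>
                have ht : t < xs'.length := by omega
                simp only [pvF] at iht ⊢
                rw [iht ht]
                have : (x :: xs').getD (t + 1 + 1) 0 = xs'.getD (t + 1) 0 := by simp
                rw [this]
                rw [max_assoc, max_left_comm]
          rw [hpv k hk, ← max_assoc]

-- candidate max as a fold over range m (the content of Source B's comprehension)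
def pvT (A B : List Int) (m : Nat) : Int :=
  (List.range m).foldl (fun acc j => max acc (min (pvF A (j + 1)) (B.getD j 0))) (pvF A 0)

theorem pv_F_mono (A : List Int) (j k : Nat) (h : j ≤ k) : pvF A j ≤ pvF A k := by
  induction k with
  | zero =>
      have : j = 0 := by omega
      subst this; exact le_refl _
  | succ t ih =>
      rcases Nat.lt_or_ge j (t + 1) with h1 | h1
      · exact le_trans (ih (by omega)) (by simp [pvF])
      · have : j = t + 1 := by omega
        subst this; exact le_refl _

theorem pv_T_le_F (A B : List Int) (m : Nat) : pvT A B m ≤ pvF A m := by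
  induction m with
  | zero => exact le_refl _
  | succ k ih =>
      unfold pvT
      rw [List.range_succ, List.foldl_append]
      simp only [List.foldl]
      apply max_le
      · exact le_trans ih (pv_F_mono A k (k + 1) (by omega))
      · exact le_trans (min_le_left _ _) (le_refl _)

-- the closed form: pvG m = max (pvT m) (B[m])
theorem pv_closed_form (A B : List Int) (m : Nat) :
    pvG A B m = max (pvT A B m) (B.getD m 0) := by
  induction m with
  | zero => simp [pvG, pvT, pvF]
  | succ k ih =>
      simp only [pvG]
      rw [ih]
      have hT : pvT A B (k + 1) = max (pvT A B k) (min (pvF A (k + 1)) (B.getD k 0)) := by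
        unfold pvT
        rw [List.range_succ, List.foldl_append]
        simp [List.foldl]
      rw [hT]
      have h1 : min (max (pvT A B k) (B.getD k 0)) (pvF A (k + 1)) =
          max (pvT A B k) (min (B.getD k 0) (pvF A (k + 1))) := by
        rw [min_max_distrib_right]
        congr 1
        exact min_eq_left (le_trans (pv_T_le_F A B k) (pv_F_mono A k (k + 1) (by omega)))
      rw [h1, min_comm (B.getD k 0) (pvF A (k + 1)), max_assoc]

-- folding max over a mapped range, with the seed combined
theorem pv_foldl_max_map (n : Nat) (f : Nat → Int) (c : Int) :
    ((List.range n).map f).foldl max c = (List.range n).foldl (fun acc j => max acc (f j)) c := by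
  induction n generalizing c with
  | zero => simp
  | succ k ih => rw [List.range_succ]; simp [ih]

-- pulling one max out of the seed of a max-accumulating fold
theorem pv_foldl_max_seed {α : Type} (f : α → Int) (l : List α) (a b : Int) :
    l.foldl (fun acc j => max acc (f j)) (max a b)
      = max (l.foldl (fun acc j => max acc (f j)) a) b := by
  induction l generalizing a with
  | nil => simp
  | cons x xs ih =>
      simp only [List.foldl]
      rw [max_right_comm]
      exact ih (max a (f x))

theorem pv_alt_eq (A B : List Int) (hA : A ≠ []) :
    solution_alt A B = pvG A B (A.length - 1) := by
  unfold solution_alt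
  rw [if_neg hA]
  have hn : 1 ≤ A.length := List.length_pos_of_ne_nil hA
  simp only
  rw [pv_fold_scan]
  simp only [List.nil_append]
  have hgetP : ∀ k : Nat, k < A.length - 1 →
      PySem.List.pyGetD (pvScan A (PySem.List.pyGetD A 0 0)) ((k : Int) + 1) 0
        = pvF A (k + 1) := by
    intro k hk
    rw [pv_cast_succ k, PySem.List.pyGetD_natCast, PySem.List.pyGetD_zero,
        pv_scan_getD A _ (k + 1) (by omega)]
    have h0 : A.getD 0 0 = pvF A 0 := by simp [pvF]
    rw [h0, max_eq_right (pv_F_mono A 0 (k + 1) (by omega))]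
  have hmap : (PySem.List.pyRange 0 ((A.length : Int) - 1) 1).map
        (fun j => min (PySem.List.pyGetD (pvScan A (PySem.List.pyGetD A 0 0)) (j + 1) 0)
            (PySem.List.pyGetD B j 0))
      = (List.range (A.length - 1)).map
        (fun k => min (pvF A (k + 1)) (B.getD k 0)) := by
    rw [PySem.List.pyRange_one,
        show (((A.length : Int) - 1) - 0).toNat = A.length - 1 by omega, List.map_map]
    apply List.map_congr_left
    intro k hk
    simp only [Function.comp]
    rw [show (0 : Int) + (k : Int) = ((k : Int)) by ring,
        hgetP k (by simpa using hk), PySem.List.pyGetD_natCast]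
  rw [hmap]
  -- the fold over the candidate list
  simp only [List.foldl]
  have hB : PySem.List.pyGetD B ((A.length : Int) - 1) 0 = B.getD (A.length - 1) 0 := by
    rw [show (A.length : Int) - 1 = ((A.length - 1 : Nat) : Int) by omega,
        PySem.List.pyGetD_natCast]
  have hA0 : PySem.List.pyGetD A 0 0 = pvF A 0 := by simp [pvF, PySem.List.pyGetD_zero]
  rw [hB, hA0, pv_foldl_max_map, pv_closed_form,
      pv_foldl_max_seed (fun k => min (pvF A (k + 1)) (B.getD k 0)) (List.range (A.length - 1))]
  rfl

-- ===== VERDICT (by name: the statement is the Claim_ definition above) =====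
theorem solution_spec : Claim_equal_solution := by
  intro A B _ _
  unfold Spec_solution
  by_cases hA : A = []
  · subst hA; rfl
  · rw [pv_a_eq A B hA, pv_alt_eq A B hA]
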